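-- pv_equiv track=rewrite | github.com/Thuan7124/TriTueNhanTao-CoTuongOnline | server/board.py | _evaluate_pins
-- ===== SOURCE A (Python) =====
-- PIECE_VALUES = {
--     'K': 10000,  # Tướng - vô giá
--     'R': 900,    # Xe
--     'C': 450,    # Pháo
--     'N': 400,    # Mã
--     'E': 200,    # Tượng
--     'A': 200,    # Sĩ
--     'P': 100     # Tốt
-- }
--
-- def _evaluate_pins(my_pieces, enemy_pieces, grid):
--     """Đánh giá thế ghìm quân (pin)"""
--     score = 0
--
--     # Tìm Xe và Pháo của ta
--     for r, c, piece in my_pieces: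
--         if piece['type'] not in ['R', 'C']:
--             continue
--
--         # Kiểm tra 4 hướng
--         directions = [(0, 1), (0, -1), (1, 0), (-1, 0)]
--         for dr, dc in directions:
--             first_piece = None
--             second_piece = None
--             nr, nc = r + dr, c + dc
--             pieces_between = 0
--
--             while 0 <= nr < 10 and 0 <= nc < 9:
--                 target = grid[nr][nc]
--                 if target:
--                     if first_piece is None:
--                         first_piece = (nr, nc, target)
--                         if piece['type'] == 'R':
--                             break  # Xe chỉ cần 1 quân
--                     else:
--                         second_piece = (nr, nc, target)
--                         break
--                     pieces_between += 1
--                 nr += dr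
--                 nc += dc
--
--             # Xe ghìm quân
--             if piece['type'] == 'R' and first_piece:
--                 fr, fc, fp = first_piece
--                 is_enemy = fp['color'] != piece['color']
--                 if is_enemy:
--                     # Kiểm tra có quân giá trị cao phía sau không
--                     nr, nc = fr + dr, fc + dc
--                     while 0 <= nr < 10 and 0 <= nc < 9:
--                         behind = grid[nr][nc]
--                         if behind:
--                             if behind['color'] != piece['color']:
--                                 if behind['type'] == 'K':
--                                     score += 5  # Ghìm vào Tướng!
--                                 elif PIECE_VALUES.get(behind['type'], 0) > PIECE_VALUES.get(fp['type'], 0):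
--                                     score += 2  # Ghìm quân nhỏ vào quân lớn
--                             break
--                         nr += dr
--                         nc += dc
--
--             # Pháo đe dọa qua 1 quân
--             if piece['type'] == 'C' and first_piece and second_piece:
--                 sr, sc, sp = second_piece
--                 if sp['color'] != piece['color']:
--                     if sp['type'] == 'K':
--                         score += 4  # Pháo nhắm Tướng
--                     else:
--                         score += 1
--
--     return score
-- ===== SOURCE B (Python) =====
-- PIECE_VALUES = {
--     'K': 10000,  # Tuong - vo gia
--     'R': 900,    # Xe
--     'C': 450,    # Phao
--     'N': 400,    # Ma
--     'E': 200,    # Tuong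
--     'A': 200,    # Si
--     'P': 100     # Tot
-- }
--
--
-- def _evaluate_pins(my_pieces, enemy_pieces, grid):
--     """Pin/threat score from a row/column occupancy index: for every row and
--     column, the ordered list of its occupied squares, built in one pass over
--     the board.  Each of a Rook/Cannon's four rays is then answered by taking
--     the first two entries of that list beyond the piece, instead of walking
--     the grid square by square."""
--     pinners = [(r, c, p) for r, c, p in my_pieces if p['type'] in ('R', 'C')]
--     if not pinners:
--         return 0
--
--     row_occ = [[(c, cell) for c, cell in enumerate(row) if cell]
--                for row in grid]
--     col_occ = [[(r, row[c]) for r, row in enumerate(grid) if row[c]]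
--                for c in range(9)]
--
--     def first_two(line, x, descending):
--         if descending:
--             hits = [(i, d) for i, d in reversed(line) if i < x]
--         else:
--             hits = [(i, d) for i, d in line if i > x]
--         return hits[:2]
--
--     def ray_score(kind, color, ray):
--         if kind == 'R':
--             if len(ray) == 2 and ray[0][1]['color'] != color:
--                 behind = ray[1][1]
--                 if behind['color'] != color:
--                     if behind['type'] == 'K':
--                         return 5
--                     if PIECE_VALUES.get(behind['type'], 0) > \
--                             PIECE_VALUES.get(ray[0][1]['type'], 0):
--                         return 2
--             return 0
--         if len(ray) == 2 and ray[1][1]['color'] != color: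
--             return 4 if ray[1][1]['type'] == 'K' else 1
--         return 0
--
--     total = 0
--     for r, c, piece in pinners:
--         kind, color = piece['type'], piece['color']
--         for line, x, descending in ((row_occ[r], c, False),
--                                     (row_occ[r], c, True),
--                                     (col_occ[c], r, False),
--                                     (col_occ[c], r, True)):
--             total += ray_score(kind, color, first_two(line, x, descending))
--     return total
-- ===== Notes on version B (the rewrite author's own statement) =====
-- stated objective: alternative
-- what changed: B builds a row/column occupancy index (ordered occupied squares per row and per column) in one pass and answers each of a Rook/Cannon's four rays by taking the first two index entries beyond the piece, replacing A's square-by-square grid walks (including A's separate second walk for the Rook's behind-piece); …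
-- outside the precondition, e.g. on _evaluate_pins([(-50, 0, {'type': 'R', 'color': 'r'})], [], []): A returns 0, B raises IndexError
import Mathlib
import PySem

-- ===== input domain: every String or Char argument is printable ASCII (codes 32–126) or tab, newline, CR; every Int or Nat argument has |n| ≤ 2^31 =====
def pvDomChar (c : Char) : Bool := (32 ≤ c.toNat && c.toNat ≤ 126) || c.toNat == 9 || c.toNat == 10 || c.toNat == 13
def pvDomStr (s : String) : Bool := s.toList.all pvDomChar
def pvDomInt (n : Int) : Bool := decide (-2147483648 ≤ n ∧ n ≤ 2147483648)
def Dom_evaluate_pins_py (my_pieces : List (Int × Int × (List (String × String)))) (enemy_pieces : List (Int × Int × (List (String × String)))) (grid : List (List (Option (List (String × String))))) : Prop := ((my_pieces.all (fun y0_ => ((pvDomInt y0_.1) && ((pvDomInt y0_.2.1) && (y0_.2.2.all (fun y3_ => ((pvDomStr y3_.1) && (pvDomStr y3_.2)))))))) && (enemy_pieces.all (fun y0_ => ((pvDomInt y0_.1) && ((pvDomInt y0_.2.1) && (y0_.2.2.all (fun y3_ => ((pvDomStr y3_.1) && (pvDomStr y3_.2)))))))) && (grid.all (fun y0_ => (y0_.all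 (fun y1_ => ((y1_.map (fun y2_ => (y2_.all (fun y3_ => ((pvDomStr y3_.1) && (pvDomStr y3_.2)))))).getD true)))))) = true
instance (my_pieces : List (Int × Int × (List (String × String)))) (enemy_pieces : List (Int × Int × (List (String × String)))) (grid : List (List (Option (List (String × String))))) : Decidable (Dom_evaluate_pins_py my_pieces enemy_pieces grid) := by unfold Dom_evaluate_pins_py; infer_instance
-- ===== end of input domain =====

-- B answers each Rook/Cannon ray from a row/column occupancy index built in one
-- pass over the board, instead of A's square-by-square grid walks; equal return
-- value proved on Pre_ (objective: alternative algorithm).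

-- ===== PORT A =====
-- module constant PIECE_VALUES and Python dict lookup d[k] (first match; "" only outside Pre_)
def PIECE_VALUES_py : PySem.Dict String Int :=
  PySem.Dict.mk [("K", 10000), ("R", 900), ("C", 450), ("N", 400), ("E", 200), ("A", 200), ("P", 100)]

def pvGetS (d : List (String × String)) (k : String) : String :=
  PySem.Dict.getD (PySem.Dict.mk d) k ""

def pvVal (t : String) : Int := PySem.Dict.getD PIECE_VALUES_py t 0

-- grid[nr][nc] (both indices nonnegative wherever A reads; none only outside Pre_)
def pvCell (grid : List (List (Option (List (String × String))))) (nr nc : Int) :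
    Option (List (String × String)) :=
  match PySem.List.pyGet? grid nr with
  | some row => (PySem.List.pyGet? row nc).getD none
  | none => none

-- fuel for A's while loops: number of steps until the moving coordinate leaves the
-- board, so the fuel never runs out before the Python loop's own bound check fires
def pvFuel (dr dc nr nc : Int) : Nat :=
  (if dr = 1 then 10 - nr else if dr = -1 then nr + 1
   else if dc = 1 then 9 - nc else nc + 1).toNat

-- A's first while loop (finds first_piece/second_piece; pb = pieces_between, dead state kept)
def pvScanLoop (grid : List (List (Option (List (String × String))))) (dr dc : Int) (isR : Bool) :
    Nat → Int → Int → Option (Int × Int × List (String × String)) →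
    Option (Int × Int × List (String × String)) → Int →
    Option (Int × Int × List (String × String)) × Option (Int × Int × List (String × String))
  | 0, _, _, f, s, _ => (f, s)
  | fuel+1, nr, nc, f, s, pb =>
    if 0 ≤ nr ∧ nr < 10 ∧ 0 ≤ nc ∧ nc < 9 then
      match pvCell grid nr nc with
      | some d =>
        if d ≠ [] then
          match f with
          | none =>
            if isR then (some (nr, nc, d), s)
            else pvScanLoop grid dr dc isR fuel (nr+dr) (nc+dc) (some (nr, nc, d)) s (pb+1)
          | some _ => (f, some (nr, nc, d))
        else pvScanLoop grid dr dc isR fuel (nr+dr) (nc+dc) f s pb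
      | none => pvScanLoop grid dr dc isR fuel (nr+dr) (nc+dc) f s pb
    else (f, s)

-- A's second while loop (the piece behind a pinned enemy piece, for a Rook)
def pvBehindLoop (grid : List (List (Option (List (String × String))))) (dr dc : Int)
    (myColor fType : String) : Nat → Int → Int → Int
  | 0, _, _ => 0
  | fuel+1, nr, nc =>
    if 0 ≤ nr ∧ nr < 10 ∧ 0 ≤ nc ∧ nc < 9 then
      match pvCell grid nr nc with
      | some d =>
        if d ≠ [] then
          (if pvGetS d "color" ≠ myColor then
            (if pvGetS d "type" = "K" then 5
             else if pvVal (pvGetS d "type") > pvVal fType then 2 else 0)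
           else 0)
        else pvBehindLoop grid dr dc myColor fType fuel (nr+dr) (nc+dc)
      | none => pvBehindLoop grid dr dc myColor fType fuel (nr+dr) (nc+dc)
    else 0

-- body of A's 'for dr, dc in directions' loop
def pvDirStep (grid : List (List (Option (List (String × String))))) (r c : Int)
    (piece : List (String × String)) (t : String) (score : Int) (d : Int × Int) : Int :=
  let dr := d.1
  let dc := d.2
  let fs := pvScanLoop grid dr dc (t == "R") (pvFuel dr dc (r+dr) (c+dc)) (r+dr) (c+dc) none none 0
  let score1 :=
    if t = "R" then
      match fs.1 with
      | some (fr, fc, fp) =>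
        if pvGetS fp "color" ≠ pvGetS piece "color" then
          score + pvBehindLoop grid dr dc (pvGetS piece "color") (pvGetS fp "type")
                    (pvFuel dr dc (fr+dr) (fc+dc)) (fr+dr) (fc+dc)
        else score
      | none => score
    else score
  if t = "C" then
    match fs.1, fs.2 with
    | some _, some (_, _, sp) =>
      if pvGetS sp "color" ≠ pvGetS piece "color" then
        if pvGetS sp "type" = "K" then score1 + 4 else score1 + 1
      else score1
    | _, _ => score1
  else score1

def evaluate_pins_py (my_pieces : List (Int × Int × (List (String × String)))) (enemy_pieces : List (Int × Int × (List (String × String)))) (grid : List (List (Option (List (String × String))))) : Int :=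
  my_pieces.foldl (fun score rcp =>
    let r := rcp.1
    let c := rcp.2.1
    let piece := rcp.2.2
    let t := pvGetS piece "type"
    if t ≠ "R" ∧ t ≠ "C" then score
    else [((0:Int), (1:Int)), (0, -1), (1, 0), (-1, 0)].foldl (pvDirStep grid r c piece t) score) 0

-- ===== PORT B =====
-- row_occ entry: [(c, cell) for c, cell in enumerate(row) if cell]
def pvLineHits (row : List (Option (List (String × String)))) :
    List (Int × List (String × String)) :=
  (PySem.List.enumerate row 0).filterMap (fun p =>
    match p.2 with
    | some d => if d ≠ [] then some (p.1, d) else none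
    | none => none)

-- col_occ entry: [(r, row[c]) for r, row in enumerate(grid) if row[c]]
-- (row[c] ported as pyGet?; the none case is an IndexError, reached only outside Pre_)
def pvColHits (grid : List (List (Option (List (String × String))))) (c : Int) :
    List (Int × List (String × String)) :=
  (PySem.List.enumerate grid 0).filterMap (fun p =>
    match (PySem.List.pyGet? p.2 c).getD none with
    | some d => if d ≠ [] then some (p.1, d) else none
    | none => none)

-- first_two(line, x, descending)
def pvFirstTwo (line : List (Int × List (String × String))) (x : Int) (descending : Bool) :
    List (Int × List (String × String)) :=
  (if descending then line.reverse.filter (fun p => decide (p.1 < x))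
   else line.filter (fun p => decide (x < p.1))).take 2

-- ray_score(kind, color, ray)
def pvRayScore (kind color : String) (ray : List (Int × List (String × String))) : Int :=
  if kind = "R" then
    match ray with
    | [f, s] =>
      if pvGetS f.2 "color" ≠ color then
        if pvGetS s.2 "color" ≠ color then
          if pvGetS s.2 "type" = "K" then 5
          else if pvVal (pvGetS s.2 "type") > pvVal (pvGetS f.2 "type") then 2 else 0
        else 0
      else 0
    | _ => 0
  else
    match ray with
    | [_, s] =>
      if pvGetS s.2 "color" ≠ color then (if pvGetS s.2 "type" = "K" then 4 else 1) else 0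
    | _ => 0

def evaluate_pins_py_alt (my_pieces : List (Int × Int × (List (String × String)))) (enemy_pieces : List (Int × Int × (List (String × String)))) (grid : List (List (Option (List (String × String))))) : Int :=
  let pinners := my_pieces.filter (fun q =>
    pvGetS q.2.2 "type" == "R" || pvGetS q.2.2 "type" == "C")
  if pinners = [] then 0
  else
    let row_occ := grid.map pvLineHits
    let col_occ := (PySem.List.pyRange 0 9 1).map (pvColHits grid)
    -- row_occ[r] / col_occ[c] ported as getD (indices on the board under Pre_)
    pinners.foldl (fun total q =>
      let kind := pvGetS q.2.2 "type"
      let color := pvGetS q.2.2 "color"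
      [(row_occ.getD q.1.toNat [], q.2.1, false), (row_occ.getD q.1.toNat [], q.2.1, true),
       (col_occ.getD q.2.1.toNat [], q.1, false), (col_occ.getD q.2.1.toNat [], q.1, true)].foldl
        (fun t lxd => t + pvRayScore kind color (pvFirstTwo lxd.1 lxd.2.1 lxd.2.2)) total) 0

-- ===== PRECONDITION & SPEC =====
abbrev pvHasKey (d : List (String × String)) (k : String) : Prop := k ∈ d.map Prod.fst

abbrev pvIsRC (p : Int × Int × List (String × String)) : Prop :=
  pvGetS p.2.2 "type" = "R" ∨ pvGetS p.2.2 "type" = "C"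

-- Pre_ restricts to the task's natural domain: every my_pieces entry carries a 'type'
-- key (else A raises KeyError), every Rook/Cannon also carries 'color' and sits on the
-- 10×9 board, and when a Rook/Cannon is present the grid is the exact 10×9 board with
-- 'type'/'color' keys on occupied cells; outside it A raises, or its value (0 via
-- never-entered while loops, or ignoring cells beyond the board) is an accident of
-- A's bounds checks on malformed input, where B indexes the board directly.
def Pre_evaluate_pins_py (my_pieces : List (Int × Int × (List (String × String)))) (enemy_pieces : List (Int × Int × (List (String × String)))) (grid : List (List (Option (List (String × String))))) : Prop :=
  (∀ p ∈ my_pieces, pvHasKey p.2.2 "type" ∧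
    (pvIsRC p → pvHasKey p.2.2 "color" ∧ 0 ≤ p.1 ∧ p.1 < 10 ∧ 0 ≤ p.2.1 ∧ p.2.1 < 9)) ∧
  ((∃ p ∈ my_pieces, pvIsRC p) →
    (grid.length = 10 ∧ ∀ row ∈ grid, row.length = 9 ∧
      ∀ cell ∈ row, ∀ d ∈ cell.toList, d ≠ [] → (pvHasKey d "type" ∧ pvHasKey d "color")))
instance (my_pieces : List (Int × Int × (List (String × String)))) (enemy_pieces : List (Int × Int × (List (String × String)))) (grid : List (List (Option (List (String × String))))) : Decidable (Pre_evaluate_pins_py my_pieces enemy_pieces grid) := by unfold Pre_evaluate_pins_py; infer_instance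

def pvWitness_evaluate_pins_py : (List (Int × Int × (List (String × String)))) × (List (Int × Int × (List (String × String)))) × (List (List (Option (List (String × String))))) :=
  ([(0, 0, [("type", "R"), ("color", "red")]),
    (0, 4, [("type", "C"), ("color", "red")])], [],
   List.replicate 10 (List.replicate 9 none))

def Spec_evaluate_pins_py (my_pieces : List (Int × Int × (List (String × String)))) (enemy_pieces : List (Int × Int × (List (String × String)))) (grid : List (List (Option (List (String × String))))) (out : Int) : Prop := out = evaluate_pins_py_alt my_pieces enemy_pieces grid
instance (my_pieces : List (Int × Int × (List (String × String)))) (enemy_pieces : List (Int × Int × (List (String × String)))) (grid : List (List (Option (List (String × String))))) (out : Int) : Decidable (Spec_evaluate_pins_py my_pieces enemy_pieces grid out) := by unfold Spec_evaluate_pins_py; infer_instance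

-- ===== CLAIM (what is proved, stated in full; the proofs are below) =====
def Claim_equal_evaluate_pins_py : Prop := ∀ (my_pieces : List (Int × Int × (List (String × String)))) (enemy_pieces : List (Int × Int × (List (String × String)))) (grid : List (List (Option (List (String × String))))), Dom_evaluate_pins_py my_pieces enemy_pieces grid → Pre_evaluate_pins_py my_pieces enemy_pieces grid → Spec_evaluate_pins_py my_pieces enemy_pieces grid (evaluate_pins_py my_pieces enemy_pieces grid)

-- ===== LEMMAS AND PROOFS =====

-- shape of the grid used by every lemma below
def pvGridOK (grid : List (List (Option (List (String × String))))) : Prop :=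
  grid.length = 10 ∧ ∀ row ∈ grid, row.length = 9

-- all occupied cells of a ray, in walk order (reference list both ports are related to)
def pvHits (grid : List (List (Option (List (String × String))))) (dr dc : Int) :
    Nat → Int → Int → List (Int × Int × List (String × String))
  | 0, _, _ => []
  | fuel+1, nr, nc =>
    if 0 ≤ nr ∧ nr < 10 ∧ 0 ≤ nc ∧ nc < 9 then
      match pvCell grid nr nc with
      | some d =>
        if d ≠ [] then (nr, nc, d) :: pvHits grid dr dc fuel (nr+dr) (nc+dc)
        else pvHits grid dr dc fuel (nr+dr) (nc+dc)
      | none => pvHits grid dr dc fuel (nr+dr) (nc+dc)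
    else []

def pvScoreBehind (myColor fType : String) :
    Option (Int × Int × List (String × String)) → Int
  | some (_, _, d) =>
    if pvGetS d "color" ≠ myColor then
      (if pvGetS d "type" = "K" then 5
       else if pvVal (pvGetS d "type") > pvVal fType then 2 else 0)
    else 0
  | none => 0

-- score contribution of one ray given only the dicts of its occupied cells, in order
def pvScoreHits (isR : Bool) (myColor : String) : List (List (String × String)) → Int
  | f :: s :: _ =>
    if isR then
      (if pvGetS f "color" ≠ myColor then
        (if pvGetS s "color" ≠ myColor then
          (if pvGetS s "type" = "K" then 5
           else if pvVal (pvGetS s "type") > pvVal (pvGetS f "type") then 2 else 0)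
         else 0)
       else 0)
    else (if pvGetS s "color" ≠ myColor then (if pvGetS s "type" = "K" then 4 else 1) else 0)
  | [f] => 0
  | [] => 0

def pvDirOK (dr dc : Int) : Prop :=
  (dr = 0 ∧ (dc = 1 ∨ dc = -1)) ∨ (dc = 0 ∧ (dr = 1 ∨ dr = -1))

theorem pvFuel_step (dr dc nr nc : Int) (hdir : pvDirOK dr dc)
    (hb : 0 ≤ nr ∧ nr < 10 ∧ 0 ≤ nc ∧ nc < 9) :
    pvFuel dr dc nr nc = pvFuel dr dc (nr+dr) (nc+dc) + 1 := by
  obtain ⟨h1, h2, h3, h4⟩ := hb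
  rcases hdir with ⟨hdr, hdc | hdc⟩ | ⟨hdc, hdr | hdr⟩ <;>
    subst hdr <;> subst hdc <;> simp [pvFuel] <;> omega

theorem pvScan2_eq (grid : List (List (Option (List (String × String))))) (dr dc : Int)
    (isR : Bool) (x : Int × Int × List (String × String)) :
    ∀ (fuel : Nat) (nr nc pb : Int),
      pvScanLoop grid dr dc isR fuel nr nc (some x) none pb =
        (some x, (pvHits grid dr dc fuel nr nc).head?) := by
  intro fuel
  induction fuel with
  | zero => intro nr nc pb; simp [pvScanLoop, pvHits]
  | succ n ih =>
    intro nr nc pb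
    simp only [pvScanLoop, pvHits]
    split
    · cases hcell : pvCell grid nr nc with
      | none => simpa using ih (nr+dr) (nc+dc) pb
      | some d =>
        by_cases hd : d = []
        · subst hd; simpa using ih (nr+dr) (nc+dc) pb
        · simp [hd]
    · rfl

theorem pvScan_eq (grid : List (List (Option (List (String × String))))) (dr dc : Int)
    (isR : Bool) :
    ∀ (fuel : Nat) (nr nc pb : Int),
      pvScanLoop grid dr dc isR fuel nr nc none none pb =
        ((pvHits grid dr dc fuel nr nc)[0]?,
         if isR then none else (pvHits grid dr dc fuel nr nc)[1]?) := by
  intro fuel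
  induction fuel with
  | zero => intro nr nc pb; cases isR <;> simp [pvScanLoop, pvHits]
  | succ n ih =>
    intro nr nc pb
    simp only [pvScanLoop, pvHits]
    split
    · cases hcell : pvCell grid nr nc with
      | none => simpa using ih (nr+dr) (nc+dc) pb
      | some d =>
        by_cases hd : d = []
        · subst hd; simpa using ih (nr+dr) (nc+dc) pb
        · cases hR : isR with
          | true => simp [hd]
          | false =>
            simp only [hd, ne_eq, not_false_iff, if_true, Bool.false_eq_true, if_false,
              Option.some.injEq, pvScan2_eq]
            cases htl : pvHits grid dr dc n (nr+dr) (nc+dc) <;> simp [hd, htl]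
    · cases isR <;> rfl

theorem pvBehind_eq (grid : List (List (Option (List (String × String))))) (dr dc : Int)
    (myColor fType : String) :
    ∀ (fuel : Nat) (nr nc : Int),
      pvBehindLoop grid dr dc myColor fType fuel nr nc =
        pvScoreBehind myColor fType (pvHits grid dr dc fuel nr nc).head? := by
  intro fuel
  induction fuel with
  | zero => intro nr nc; simp [pvBehindLoop, pvHits, pvScoreBehind]
  | succ n ih =>
    intro nr nc
    simp only [pvBehindLoop, pvHits]
    split
    · cases hcell : pvCell grid nr nc with
      | none => simpa using ih (nr+dr) (nc+dc)
      | some d =>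
        by_cases hd : d = []
        · subst hd; simpa using ih (nr+dr) (nc+dc)
        · simp [hd, pvScoreBehind]
    · simp [pvScoreBehind]

theorem pvHits_tail (grid : List (List (Option (List (String × String))))) (dr dc : Int)
    (hdir : pvDirOK dr dc) :
    ∀ (fuel : Nat) (nr nc : Int) (a b : Int) (d : List (String × String))
      (tl : List (Int × Int × List (String × String))),
      fuel = pvFuel dr dc nr nc →
      pvHits grid dr dc fuel nr nc = (a, b, d) :: tl →
      tl = pvHits grid dr dc (pvFuel dr dc (a+dr) (b+dc)) (a+dr) (b+dc) := by
  intro fuel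
  induction fuel with
  | zero => intro nr nc a b d tl _ h; simp [pvHits] at h
  | succ n ih =>
    intro nr nc a b d tl hfuel h
    rw [pvHits] at h
    by_cases hb : 0 ≤ nr ∧ nr < 10 ∧ 0 ≤ nc ∧ nc < 9
    · rw [if_pos hb] at h
      have hstep : pvFuel dr dc nr nc = pvFuel dr dc (nr+dr) (nc+dc) + 1 :=
        pvFuel_step dr dc nr nc hdir hb
      have hn : n = pvFuel dr dc (nr+dr) (nc+dc) := by omega
      cases hcell : pvCell grid nr nc with
      | none => rw [hcell] at h; exact ih (nr+dr) (nc+dc) a b d tl hn h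
      | some e =>
        rw [hcell] at h
        by_cases he : e = []
        · subst he; simp at h; exact ih (nr+dr) (nc+dc) a b d tl hn h
        · simp [he] at h
          obtain ⟨⟨ha, hb', hd⟩, htl⟩ := h
          subst ha; subst hb'; subst hd; rw [← htl, hn]
    · rw [if_neg hb] at h; simp at h

-- A's per-direction step written through pvHits
theorem pvDirStep_hits (grid : List (List (Option (List (String × String))))) (r c : Int)
    (piece : List (String × String)) (t : String) (score : Int) (dr dc : Int)
    (hdir : pvDirOK dr dc) (ht : t = "R" ∨ t = "C") :
    pvDirStep grid r c piece t score (dr, dc) =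
      score + pvScoreHits (t == "R") (pvGetS piece "color")
        ((pvHits grid dr dc (pvFuel dr dc (r+dr) (c+dc)) (r+dr) (c+dc)).map (·.2.2)) := by
  rcases ht with ht | ht <;> subst ht
  · simp only [pvDirStep]
    rw [pvScan_eq]
    cases hH : pvHits grid dr dc (pvFuel dr dc (r+dr) (c+dc)) (r+dr) (c+dc) with
    | nil => simp [pvScoreHits]
    | cons hd tl =>
      obtain ⟨fr, fc, fp⟩ := hd
      have htl : tl = pvHits grid dr dc (pvFuel dr dc (fr+dr) (fc+dc)) (fr+dr) (fc+dc) :=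
        pvHits_tail grid dr dc hdir _ _ _ fr fc fp tl rfl hH
      cases htl2 : tl with
      | nil =>
        simp only [htl2] at htl
        simp [pvBehind_eq, ← htl, pvScoreHits, pvScoreBehind]
      | cons sd tl2 =>
        obtain ⟨sr, sc, sp⟩ := sd
        simp only [htl2] at htl
        simp [pvBehind_eq, ← htl, pvScoreHits, pvScoreBehind]
        split_ifs <;> simp <;> omega
  · simp only [pvDirStep]
    rw [pvScan_eq]
    cases hH : pvHits grid dr dc (pvFuel dr dc (r+dr) (c+dc)) (r+dr) (c+dc) with
    | nil => simp [pvScoreHits]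
    | cons hd tl =>
      obtain ⟨fr, fc, fp⟩ := hd
      cases htl2 : tl with
      | nil => simp [pvScoreHits]
      | cons sd tl2 =>
        obtain ⟨sr, sc, sp⟩ := sd
        simp [pvScoreHits]
        split_ifs <;> simp <;> omega

-- B's ray_score written through pvScoreHits
theorem pvRayScore_eq (t myColor : String) (l : List (Int × List (String × String)))
    (ht : t = "R" ∨ t = "C") :
    pvRayScore t myColor (l.take 2) = pvScoreHits (t == "R") myColor (l.map (·.2)) := by
  rcases ht with ht | ht <;> subst ht <;>
    rcases l with _ | ⟨⟨i, f⟩, _ | ⟨⟨j, g⟩, rest⟩⟩ <;>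
      simp [pvRayScore, pvScoreHits]

-- generic occupancy machinery -------------------------------------------------

def pvEnumFM {α : Type} (g : α → Option (List (String × String))) (l : List α) (k : Int) :
    List (Int × List (String × String)) :=
  (PySem.List.enumerate l k).filterMap (fun p => (g p.2).map (fun d => (p.1, d)))

def pvGRow (cell : Option (List (String × String))) : Option (List (String × String)) :=
  match cell with
  | some d => if d ≠ [] then some d else none
  | none => none

def pvGCol (cc : Nat) (row : List (Option (List (String × String)))) :
    Option (List (String × String)) :=
  match row[cc]? with
  | some (some d) => if d ≠ [] then some d else none
  | _ => none

theorem pvLineHits_eq (row : List (Option (List (String × String)))) :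
    pvLineHits row = pvEnumFM pvGRow row 0 := by
  rw [pvLineHits, pvEnumFM]
  congr 1
  funext p
  rcases p with ⟨i, _ | d⟩ <;> simp [pvGRow]
  by_cases hd : d = [] <;> simp [hd]

theorem pvColHits_eq (grid : List (List (Option (List (String × String))))) (c : Int)
    (hc : 0 ≤ c) : pvColHits grid c = pvEnumFM (pvGCol c.toNat) grid 0 := by
  rw [pvColHits, pvEnumFM]
  congr 1
  funext p
  rw [PySem.List.pyGet?_of_nonneg _ hc]
  rcases hrow : p.2[c.toNat]? with _ | (_ | d) <;> simp [pvGCol, hrow]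
  by_cases hd : d = [] <;> simp [hd]

theorem pvEnumFM_filter_ge {α : Type} (g : α → Option (List (String × String))) :
    ∀ (l : List α) (k s : Int),
      (pvEnumFM g l k).filter (fun p => decide (s ≤ p.1)) =
        pvEnumFM g (l.drop (s - k).toNat) (max k s) := by
  intro l
  induction l with
  | nil => intro k s; simp [pvEnumFM, PySem.List.enumerate_nil]
  | cons x l ih =>
    intro k s
    by_cases hs : s ≤ k
    · have hmax : max k s = k := by omega
      have h0 : (s - k).toNat = 0 := by omega
      have hrec := ih (k+1) s
      have hmax1 : max (k+1) s = k + 1 := by omega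
      have h1 : (s - (k+1)).toNat = 0 := by omega
      rw [hmax1, h1, List.drop_zero] at hrec
      rw [hmax, h0, List.drop_zero]
      simp only [pvEnumFM, PySem.List.enumerate_cons, List.filterMap_cons] at hrec ⊢
      cases hg : g x with
      | none => simpa [hg] using hrec
      | some d => simp [hg, List.filter_cons, hs, hrec]
    · push_neg at hs
      have hks : ¬ s ≤ k := by omega
      have hmax : max k s = s := by omega
      have hmax1 : max (k+1) s = s := by omega
      have hdrop : (s - k).toNat = (s - (k+1)).toNat + 1 := by omega
      have hrec := ih (k+1) s
      rw [hmax1] at hrec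
      rw [hmax, hdrop, List.drop_succ_cons]
      simp only [pvEnumFM, PySem.List.enumerate_cons, List.filterMap_cons] at hrec ⊢
      cases hg : g x with
      | none => simpa [hg] using hrec
      | some d => simp [hg, List.filter_cons, hks, hrec]

theorem pvEnumFM_filter_lt {α : Type} (g : α → Option (List (String × String))) :
    ∀ (l : List α) (k x : Int),
      (pvEnumFM g l k).filter (fun p => decide (p.1 < x)) =
        pvEnumFM g (l.take (x - k).toNat) k := by
  intro l
  induction l with
  | nil => intro k x; simp [pvEnumFM, PySem.List.enumerate_nil]
  | cons a l ih =>
    intro k x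
    by_cases hx : k < x
    · have htake : (x - k).toNat = (x - (k+1)).toNat + 1 := by omega
      have hrec := ih (k+1) x
      rw [htake, List.take_succ_cons]
      simp only [pvEnumFM, PySem.List.enumerate_cons, List.filterMap_cons] at hrec ⊢
      cases hg : g a with
      | none => simpa [hg] using hrec
      | some d => simp [hg, List.filter_cons, hx, hrec]
    · have htake : (x - k).toNat = 0 := by omega
      have htake1 : (x - (k+1)).toNat = 0 := by omega
      have hrec := ih (k+1) x
      rw [htake1, List.take_zero] at hrec
      rw [htake, List.take_zero]
      simp only [pvEnumFM, PySem.List.enumerate_cons, List.filterMap_cons,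
        PySem.List.enumerate_nil, List.filterMap_nil] at hrec ⊢
      cases hg : g a with
      | none => simpa [hg] using hrec
      | some d => simp [hg, List.filter_cons, hx, hrec]

-- generic forward / backward walks along one line
def pvLineF {α : Type} (g : α → Option (List (String × String))) (l : List α) :
    Nat → Int → List (Int × List (String × String))
  | 0, _ => []
  | fuel+1, s =>
    if 0 ≤ s then
      match l[s.toNat]? with
      | some x =>
        match g x with
        | some d => (s, d) :: pvLineF g l fuel (s+1)
        | none => pvLineF g l fuel (s+1)
      | none => []
    else []

def pvLineB {α : Type} (g : α → Option (List (String × String))) (l : List α) :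
    Nat → Int → List (Int × List (String × String))
  | 0, _ => []
  | fuel+1, s =>
    if 0 ≤ s ∧ s < l.length then
      match l[s.toNat]? with
      | some x =>
        match g x with
        | some d => (s, d) :: pvLineB g l fuel (s-1)
        | none => pvLineB g l fuel (s-1)
      | none => []
    else []

theorem pvLineF_eq {α : Type} (g : α → Option (List (String × String))) (l : List α) :
    ∀ (fuel : Nat) (s : Int), 0 ≤ s → fuel = l.length - s.toNat →
      pvLineF g l fuel s = pvEnumFM g (l.drop s.toNat) s := by
  intro fuel
  induction fuel with
  | zero =>
    intro s h0 hf
    have : l.length ≤ s.toNat := by omega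
    simp [pvLineF, pvEnumFM, List.drop_of_length_le this, PySem.List.enumerate_nil]
  | succ n ih =>
    intro s h0 hf
    by_cases hlt : s.toNat < l.length
    · have hget : l[s.toNat]? = some l[s.toNat] := List.getElem?_eq_getElem hlt
      have hdrop : l.drop s.toNat = l[s.toNat] :: l.drop (s.toNat + 1) :=
        List.drop_eq_getElem_cons hlt
      have hs1 : (s + 1).toNat = s.toNat + 1 := by omega
      have hrec := ih (s+1) (by omega) (by omega)
      rw [hs1] at hrec
      simp only [pvLineF, if_pos h0, hget, hdrop]
      simp only [pvEnumFM, PySem.List.enumerate_cons, List.filterMap_cons]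
      cases hg : g l[s.toNat] with
      | none => simpa [hg, pvEnumFM] using hrec
      | some d => simp [hg, pvEnumFM] at hrec ⊢; exact hrec
    · omega

theorem pvLineB_eq {α : Type} (g : α → Option (List (String × String))) (l : List α) :
    ∀ (fuel : Nat) (s : Int), s < (l.length : Int) → fuel = (s+1).toNat →
      pvLineB g l fuel s = (pvEnumFM g (l.take (s+1).toNat) 0).reverse := by
  intro fuel
  induction fuel with
  | zero =>
    intro s hlen hf
    have : (s+1).toNat = 0 := by omega
    simp [pvLineB, pvEnumFM, this, PySem.List.enumerate_nil]
  | succ n ih =>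
    intro s hlen hf
    have h0 : 0 ≤ s := by omega
    have hsn : s.toNat = n := by omega
    have hlt : s.toNat < l.length := by omega
    have hget : l[s.toNat]? = some l[s.toNat] := List.getElem?_eq_getElem hlt
    have hcond : 0 ≤ s ∧ s < (l.length : Int) := ⟨h0, hlen⟩
    have htake : l.take ((s+1).toNat) = l.take s.toNat ++ [l[s.toNat]] := by
      have : (s+1).toNat = s.toNat + 1 := by omega
      rw [this, List.take_succ, hget]; rfl
    have hlentake : (l.take s.toNat).length = s.toNat := by
      simp [List.length_take]; omega
    have hrec := ih (s-1) (by omega) (by omega)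
    have htake1 : ((s-1)+1).toNat = s.toNat := by omega
    rw [htake1] at hrec
    simp only [pvLineB, if_pos hcond, hget, htake]
    simp only [pvEnumFM, PySem.List.enumerate_append, List.filterMap_append, hlentake]
    have hco : ((0:Int) + (s.toNat : Int)) = s := by omega
    simp only [hco, PySem.List.enumerate_cons, PySem.List.enumerate_nil, List.filterMap_cons,
      List.filterMap_nil]
    cases hg : g l[s.toNat] with
    | none => simpa [hg, pvEnumFM] using hrec
    | some d => simp [hg, pvEnumFM] at hrec ⊢; exact hrec

-- instantiation: A's walks are the generic line walks -------------------------

theorem pvRowFacts (grid : List (List (Option (List (String × String)))))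
    (hG : pvGridOK grid) (r : Int) (hr : 0 ≤ r ∧ r < 10) :
    ∃ row, grid[r.toNat]? = some row ∧ grid.getD r.toNat [] = row ∧
      row.length = 9 ∧ PySem.List.pyGet? grid r = some row := by
  have h10 := hG.1
  have h1 : r.toNat < grid.length := by omega
  refine ⟨grid[r.toNat], List.getElem?_eq_getElem h1, ?_, ?_, ?_⟩
  · simp [List.getD, List.getElem?_eq_getElem h1]
  · exact hG.2 _ (List.getElem_mem h1)
  · rw [PySem.List.pyGet?_of_nonneg grid hr.1]
    exact List.getElem?_eq_getElem h1

theorem pvCellRow (grid : List (List (Option (List (String × String)))))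
    (hG : pvGridOK grid) (r : Int) (hr : 0 ≤ r ∧ r < 10) (s : Int) (hs : 0 ≤ s ∧ s < 9) :
    (grid.getD r.toNat [])[s.toNat]? = some (pvCell grid r s) := by
  obtain ⟨row, hsome, hgetd, hlen, hpy⟩ := pvRowFacts grid hG r hr
  rw [hgetd]
  have hlt : s.toNat < row.length := by omega
  rw [List.getElem?_eq_getElem hlt]
  congr 1
  rw [pvCell, hpy]
  simp [PySem.List.pyGet?_of_nonneg row hs.1, List.getElem?_eq_getElem hlt]

theorem pvCellCol (grid : List (List (Option (List (String × String)))))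
    (hG : pvGridOK grid) (c : Int) (hc : 0 ≤ c ∧ c < 9) (s : Int) (hs : 0 ≤ s ∧ s < 10) :
    ∃ row, grid[s.toNat]? = some row ∧ row[c.toNat]? = some (pvCell grid s c) := by
  obtain ⟨row, hsome, hgetd, hlen, hpy⟩ := pvRowFacts grid hG s hs
  refine ⟨row, hsome, ?_⟩
  have hlt : c.toNat < row.length := by omega
  rw [List.getElem?_eq_getElem hlt]
  congr 1
  rw [pvCell, hpy]
  simp [PySem.List.pyGet?_of_nonneg row hc.1, List.getElem?_eq_getElem hlt]

theorem pvHitsE_eq (grid : List (List (Option (List (String × String)))))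
    (hG : pvGridOK grid) (r : Int) (hr : 0 ≤ r ∧ r < 10) :
    ∀ (fuel : Nat) (s : Int),
      pvHits grid 0 1 fuel r s =
        (pvLineF pvGRow (grid.getD r.toNat []) fuel s).map (fun p => (r, p.1, p.2)) := by
  obtain ⟨row, hsome, hgetd, hlen, hpy⟩ := pvRowFacts grid hG r hr
  have hrowlen : (grid.getD r.toNat []).length = 9 := by rw [hgetd, hlen]
  intro fuel
  induction fuel with
  | zero => intro s; simp [pvHits, pvLineF]
  | succ n ih =>
    intro s
    by_cases h0 : 0 ≤ s
    · by_cases h9 : s < 9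
      · have hcond : 0 ≤ r ∧ r < 10 ∧ 0 ≤ s ∧ s < 9 := ⟨hr.1, hr.2, h0, h9⟩
        rw [pvHits, if_pos hcond, pvLineF, if_pos h0,
          pvCellRow grid hG r hr s ⟨h0, h9⟩]
        cases hcell : pvCell grid r s with
        | none => simpa [pvGRow] using ih (s+1)
        | some d =>
          by_cases hd : d = []
          · subst hd; simpa [pvGRow] using ih (s+1)
          · simpa [pvGRow, hd] using ih (s+1)
      · have hcond : ¬(0 ≤ r ∧ r < 10 ∧ 0 ≤ s ∧ s < 9) := by omega
        rw [pvHits, if_neg hcond, pvLineF, if_pos h0]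
        have hnone : (grid.getD r.toNat [])[s.toNat]? = none := by
          rw [List.getElem?_eq_none]; omega
        simp only [List.getD] at hnone ⊢
        simp [hnone]
    · have hcond : ¬(0 ≤ r ∧ r < 10 ∧ 0 ≤ s ∧ s < 9) := by omega
      rw [pvHits, if_neg hcond, pvLineF, if_neg h0]
      simp

theorem pvHitsW_eq (grid : List (List (Option (List (String × String)))))
    (hG : pvGridOK grid) (r : Int) (hr : 0 ≤ r ∧ r < 10) :
    ∀ (fuel : Nat) (s : Int),
      pvHits grid 0 (-1) fuel r s =
        (pvLineB pvGRow (grid.getD r.toNat []) fuel s).map (fun p => (r, p.1, p.2)) := by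
  obtain ⟨row, hsome, hgetd, hlen, hpy⟩ := pvRowFacts grid hG r hr
  have hrowlen : (grid.getD r.toNat []).length = 9 := by rw [hgetd, hlen]
  have hcast : ((grid.getD r.toNat []).length : Int) = 9 := by rw [hrowlen]; norm_num
  intro fuel
  induction fuel with
  | zero => intro s; simp [pvHits, pvLineB]
  | succ n ih =>
    intro s
    by_cases hin : 0 ≤ s ∧ s < 9
    · have hcond : 0 ≤ r ∧ r < 10 ∧ 0 ≤ s ∧ s < 9 := ⟨hr.1, hr.2, hin.1, hin.2⟩
      have hcondB : 0 ≤ s ∧ s < ((grid.getD r.toNat []).length : Int) := by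
        rw [hcast]; exact hin
      rw [pvHits, if_pos hcond, pvLineB, if_pos hcondB,
        pvCellRow grid hG r hr s hin]
      cases hcell : pvCell grid r s with
      | none => simpa [pvGRow, sub_eq_add_neg] using ih (s-1)
      | some d =>
        by_cases hd : d = []
        · subst hd; simpa [pvGRow, sub_eq_add_neg] using ih (s-1)
        · simpa [pvGRow, hd, sub_eq_add_neg] using ih (s-1)
    · have hcondB : ¬(0 ≤ s ∧ s < ((grid.getD r.toNat []).length : Int)) := by
        rw [hcast]; exact hin
      rw [pvHits, if_neg (by omega), pvLineB, if_neg hcondB]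
      simp

theorem pvHitsS_eq (grid : List (List (Option (List (String × String)))))
    (hG : pvGridOK grid) (c : Int) (hc : 0 ≤ c ∧ c < 9) :
    ∀ (fuel : Nat) (s : Int),
      pvHits grid 1 0 fuel s c =
        (pvLineF (pvGCol c.toNat) grid fuel s).map (fun p => (p.1, c, p.2)) := by
  have h10 := hG.1
  intro fuel
  induction fuel with
  | zero => intro s; simp [pvHits, pvLineF]
  | succ n ih =>
    intro s
    by_cases h0 : 0 ≤ s
    · by_cases h10s : s < 10
      · obtain ⟨row, hsome, hrowc⟩ := pvCellCol grid hG c hc s ⟨h0, h10s⟩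
        have hcond : 0 ≤ s ∧ s < 10 ∧ 0 ≤ c ∧ c < 9 := ⟨h0, h10s, hc.1, hc.2⟩
        rw [pvHits, if_pos hcond, pvLineF, if_pos h0, hsome]
        cases hcell : pvCell grid s c with
        | none => rw [hcell] at hrowc; simpa [pvGCol, hrowc] using ih (s+1)
        | some d =>
          rw [hcell] at hrowc
          by_cases hd : d = []
          · subst hd; simpa [pvGCol, hrowc] using ih (s+1)
          · simpa [pvGCol, hrowc, hd] using ih (s+1)
      · have hnone : grid[s.toNat]? = none := by
          rw [List.getElem?_eq_none]; omega
        rw [pvHits, if_neg (by omega), pvLineF, if_pos h0, hnone]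
        simp
    · rw [pvHits, if_neg (by omega), pvLineF, if_neg h0]
      simp

theorem pvHitsN_eq (grid : List (List (Option (List (String × String)))))
    (hG : pvGridOK grid) (c : Int) (hc : 0 ≤ c ∧ c < 9) :
    ∀ (fuel : Nat) (s : Int),
      pvHits grid (-1) 0 fuel s c =
        (pvLineB (pvGCol c.toNat) grid fuel s).map (fun p => (p.1, c, p.2)) := by
  have h10 := hG.1
  have hcast : (grid.length : Int) = 10 := by rw [h10]; norm_num
  intro fuel
  induction fuel with
  | zero => intro s; simp [pvHits, pvLineB]
  | succ n ih =>
    intro s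
    by_cases hin : 0 ≤ s ∧ s < 10
    · obtain ⟨row, hsome, hrowc⟩ := pvCellCol grid hG c hc s hin
      have hcond : 0 ≤ s ∧ s < 10 ∧ 0 ≤ c ∧ c < 9 := ⟨hin.1, hin.2, hc.1, hc.2⟩
      have hcondB : 0 ≤ s ∧ s < (grid.length : Int) := by rw [hcast]; exact hin
      rw [pvHits, if_pos hcond, pvLineB, if_pos hcondB, hsome]
      cases hcell : pvCell grid s c with
      | none => rw [hcell] at hrowc; simpa [pvGCol, hrowc, sub_eq_add_neg] using ih (s-1)
      | some d =>
        rw [hcell] at hrowc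
        by_cases hd : d = []
        · subst hd; simpa [pvGCol, hrowc, sub_eq_add_neg] using ih (s-1)
        · simpa [pvGCol, hrowc, hd, sub_eq_add_neg] using ih (s-1)
    · have hcondB : ¬(0 ≤ s ∧ s < (grid.length : Int)) := by rw [hcast]; exact hin
      rw [pvHits, if_neg (by omega), pvLineB, if_neg hcondB]
      simp

-- the four in-range direction equalities ---------------------------------------

theorem pvDirE (grid : List (List (Option (List (String × String))))) (r c : Int)
    (piece : List (String × String)) (t : String) (score : Int)
    (hG : pvGridOK grid) (hr : 0 ≤ r ∧ r < 10) (hc : 0 ≤ c ∧ c < 9) (ht : t = "R" ∨ t = "C") :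
    pvDirStep grid r c piece t score (0, 1) =
      score + pvRayScore t (pvGetS piece "color")
        (pvFirstTwo (pvLineHits (grid.getD r.toNat [])) c false) := by
  rw [pvDirStep_hits grid r c piece t score 0 1 (Or.inl ⟨rfl, Or.inl rfl⟩) ht]
  congr 1
  rw [pvFirstTwo]
  simp only [Bool.false_eq_true, if_false]
  rw [pvRayScore_eq _ _ _ ht]
  simp only [add_zero]
  obtain ⟨row, hsome, hgetd, hlen, hpy⟩ := pvRowFacts grid hG r hr
  have hrowlen : (grid.getD r.toNat []).length = 9 := by rw [hgetd, hlen]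
  have hfuel : pvFuel 0 1 r (c+1) = (grid.getD r.toNat []).length - (c+1).toNat := by
    rw [hrowlen]; simp [pvFuel]; omega
  rw [pvHitsE_eq grid hG r hr (pvFuel 0 1 r (c+1)) (c+1),
      pvLineF_eq pvGRow (grid.getD r.toNat []) (pvFuel 0 1 r (c+1)) (c+1) (by omega) hfuel,
      pvLineHits_eq]
  have hpred : (fun p : Int × List (String × String) => decide (c < p.1)) =
      (fun p : Int × List (String × String) => decide (c + 1 ≤ p.1)) := by
    funext p; by_cases h : c < p.1 <;> simp [h] <;> omega
  rw [hpred, pvEnumFM_filter_ge]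
  rw [show ((c+1) - (0:Int)).toNat = (c+1).toNat from by omega,
      show max (0:Int) (c+1) = c + 1 from by omega]
  simp only [List.map_map]
  congr 1

theorem pvDirW (grid : List (List (Option (List (String × String))))) (r c : Int)
    (piece : List (String × String)) (t : String) (score : Int)
    (hG : pvGridOK grid) (hr : 0 ≤ r ∧ r < 10) (hc : 0 ≤ c ∧ c < 9) (ht : t = "R" ∨ t = "C") :
    pvDirStep grid r c piece t score (0, -1) =
      score + pvRayScore t (pvGetS piece "color")
        (pvFirstTwo (pvLineHits (grid.getD r.toNat [])) c true) := by
  rw [pvDirStep_hits grid r c piece t score 0 (-1) (Or.inl ⟨rfl, Or.inr rfl⟩) ht]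
  congr 1
  rw [pvFirstTwo]
  simp only [if_true]
  rw [pvRayScore_eq _ _ _ ht]
  simp only [add_zero]
  obtain ⟨row, hsome, hgetd, hlen, hpy⟩ := pvRowFacts grid hG r hr
  have hrowlen : (grid.getD r.toNat []).length = 9 := by rw [hgetd, hlen]
  have hslen : (c + -1) < ((grid.getD r.toNat []).length : Int) := by rw [hrowlen]; omega
  have hfuel : pvFuel 0 (-1) r (c + -1) = ((c + -1) + 1).toNat := by
    simp [pvFuel]
  rw [pvHitsW_eq grid hG r hr (pvFuel 0 (-1) r (c + -1)) (c + -1),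
      pvLineB_eq pvGRow (grid.getD r.toNat []) (pvFuel 0 (-1) r (c + -1)) (c + -1) hslen hfuel,
      pvLineHits_eq, List.filter_reverse, pvEnumFM_filter_lt]
  rw [show (c - (0:Int)).toNat = ((c + -1) + 1).toNat from by omega]
  simp only [List.map_map, List.map_reverse]
  congr 1

theorem pvDirS (grid : List (List (Option (List (String × String))))) (r c : Int)
    (piece : List (String × String)) (t : String) (score : Int)
    (hG : pvGridOK grid) (hr : 0 ≤ r ∧ r < 10) (hc : 0 ≤ c ∧ c < 9) (ht : t = "R" ∨ t = "C") :
    pvDirStep grid r c piece t score (1, 0) =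
      score + pvRayScore t (pvGetS piece "color")
        (pvFirstTwo (pvColHits grid c) r false) := by
  rw [pvDirStep_hits grid r c piece t score 1 0 (Or.inr ⟨rfl, Or.inl rfl⟩) ht]
  congr 1
  rw [pvFirstTwo]
  simp only [Bool.false_eq_true, if_false]
  rw [pvRayScore_eq _ _ _ ht]
  simp only [add_zero]
  have h10 := hG.1
  have hfuel : pvFuel 1 0 (r+1) c = grid.length - (r+1).toNat := by
    rw [h10]; simp [pvFuel]; omega
  rw [pvHitsS_eq grid hG c hc (pvFuel 1 0 (r+1) c) (r+1),
      pvLineF_eq (pvGCol c.toNat) grid (pvFuel 1 0 (r+1) c) (r+1) (by omega) hfuel,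
      pvColHits_eq grid c hc.1]
  have hpred : (fun p : Int × List (String × String) => decide (r < p.1)) =
      (fun p : Int × List (String × String) => decide (r + 1 ≤ p.1)) := by
    funext p; by_cases h : r < p.1 <;> simp [h] <;> omega
  rw [hpred, pvEnumFM_filter_ge]
  rw [show ((r+1) - (0:Int)).toNat = (r+1).toNat from by omega,
      show max (0:Int) (r+1) = r + 1 from by omega]
  simp only [List.map_map]
  congr 1

theorem pvDirN (grid : List (List (Option (List (String × String))))) (r c : Int)
    (piece : List (String × String)) (t : String) (score : Int)
    (hG : pvGridOK grid) (hr : 0 ≤ r ∧ r < 10) (hc : 0 ≤ c ∧ c < 9) (ht : t = "R" ∨ t = "C") :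
    pvDirStep grid r c piece t score (-1, 0) =
      score + pvRayScore t (pvGetS piece "color")
        (pvFirstTwo (pvColHits grid c) r true) := by
  rw [pvDirStep_hits grid r c piece t score (-1) 0 (Or.inr ⟨rfl, Or.inr rfl⟩) ht]
  congr 1
  rw [pvFirstTwo]
  simp only [if_true]
  rw [pvRayScore_eq _ _ _ ht]
  simp only [add_zero]
  have h10 := hG.1
  have hslen : (r + -1) < ((grid.length) : Int) := by rw [h10]; omega
  have hfuel : pvFuel (-1) 0 (r + -1) c = ((r + -1) + 1).toNat := by
    simp [pvFuel]
  rw [pvHitsN_eq grid hG c hc (pvFuel (-1) 0 (r + -1) c) (r + -1),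
      pvLineB_eq (pvGCol c.toNat) grid (pvFuel (-1) 0 (r + -1) c) (r + -1) hslen hfuel,
      pvColHits_eq grid c hc.1, List.filter_reverse, pvEnumFM_filter_lt]
  rw [show (r - (0:Int)).toNat = ((r + -1) + 1).toNat from by omega]
  simp only [List.map_map, List.map_reverse]
  congr 1

-- folding A's step over the pieces the filter drops changes nothing
theorem pvFoldl_filter {α : Type} (f : Int → α → Int) (p : α → Bool) :
    ∀ (l : List α) (b : Int), (∀ a x, x ∈ l → p x = false → f a x = a) →
      l.foldl f b = (l.filter p).foldl f b := by
  intro l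
  induction l with
  | nil => intro b _; rfl
  | cons x l ih =>
    intro b h
    cases hp : p x with
    | true =>
      simp only [List.foldl_cons, List.filter_cons, hp, if_true]
      exact ih (f b x) (fun a y hy => h a y (List.mem_cons_of_mem x hy))
    | false =>
      simp only [List.foldl_cons, List.filter_cons, hp, Bool.false_eq_true, if_false]
      rw [h b x (List.mem_cons_self) hp]
      exact ih b (fun a y hy => h a y (List.mem_cons_of_mem x hy))

theorem pvColOcc_getD (grid : List (List (Option (List (String × String))))) (c : Int)
    (hc : 0 ≤ c ∧ c < 9) :
    ((PySem.List.pyRange 0 9 1).map (pvColHits grid)).getD c.toNat [] = pvColHits grid c := by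
  have h9 : PySem.List.pyRange 0 9 1 = [0, 1, 2, 3, 4, 5, 6, 7, 8] := by decide
  rw [h9]
  obtain ⟨h0, h1⟩ := hc
  interval_cases c <;> rfl

-- ===== VERDICT (by name: the statement is the Claim_ definition above) =====
theorem evaluate_pins_py_spec : Claim_equal_evaluate_pins_py := by
  intro my_pieces enemy_pieces grid _ hPre
  unfold Spec_evaluate_pins_py
  simp only [evaluate_pins_py, evaluate_pins_py_alt]
  set pin? : (Int × Int × List (String × String)) → Bool := fun q =>
    pvGetS q.2.2 "type" == "R" || pvGetS q.2.2 "type" == "C" with hpin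
  by_cases hemp : my_pieces.filter pin? = []
  · rw [hemp]
    simp only [if_true]
    have hall : ∀ a x, x ∈ my_pieces → pin? x = false →
        (fun score (rcp : Int × Int × List (String × String)) =>
          let t := pvGetS rcp.2.2 "type"
          if t ≠ "R" ∧ t ≠ "C" then score
          else [((0:Int), (1:Int)), (0, -1), (1, 0), (-1, 0)].foldl
            (pvDirStep grid rcp.1 rcp.2.1 rcp.2.2 t) score) a x = a := by
      intro a x _ hx
      simp only [hpin, Bool.or_eq_false_iff, beq_eq_false_iff_ne, ne_eq] at hx
      simp [hx.1, hx.2]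
    rw [pvFoldl_filter _ pin? my_pieces 0 hall, hemp]
    rfl
  · rw [if_neg hemp]
    have hx : ∃ p ∈ my_pieces, pvIsRC p := by
      obtain ⟨q, hq⟩ := List.exists_mem_of_ne_nil _ hemp
      have hqm := List.mem_of_mem_filter hq
      have hqp := List.of_mem_filter hq
      simp only [hpin, Bool.or_eq_true, beq_iff_eq] at hqp
      exact ⟨q, hqm, hqp⟩
    have hGfull := hPre.2 hx
    have hG : pvGridOK grid := ⟨hGfull.1, fun row hrow => (hGfull.2 row hrow).1⟩
    have hall : ∀ a x, x ∈ my_pieces → pin? x = false →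
        (fun score (rcp : Int × Int × List (String × String)) =>
          let t := pvGetS rcp.2.2 "type"
          if t ≠ "R" ∧ t ≠ "C" then score
          else [((0:Int), (1:Int)), (0, -1), (1, 0), (-1, 0)].foldl
            (pvDirStep grid rcp.1 rcp.2.1 rcp.2.2 t) score) a x = a := by
      intro a x _ hxf
      simp only [hpin, Bool.or_eq_false_iff, beq_eq_false_iff_ne, ne_eq] at hxf
      simp [hxf.1, hxf.2]
    rw [pvFoldl_filter _ pin? my_pieces 0 hall]
    apply PySem.List.foldl_congr_mem
    intro acc q hq
    obtain ⟨r, c, piece⟩ := q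
    have hqm := List.mem_of_mem_filter hq
    have hqp := List.of_mem_filter hq
    simp only [hpin, Bool.or_eq_true, beq_iff_eq] at hqp
    have ht : pvGetS piece "type" = "R" ∨ pvGetS piece "type" = "C" := hqp
    have hkeys := (hPre.1 _ hqm).2 ht
    have hr : 0 ≤ r ∧ r < 10 := ⟨hkeys.2.1, hkeys.2.2.1⟩
    have hc : 0 ≤ c ∧ c < 9 := ⟨hkeys.2.2.2.1, hkeys.2.2.2.2⟩
    have hrow : (grid.map pvLineHits).getD r.toNat [] = pvLineHits (grid.getD r.toNat []) := by
      obtain ⟨row, hsome, hgetd, -, -⟩ := pvRowFacts grid hG r hr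
      simp [List.getD, List.getElem?_map, hsome, hgetd]
    have htne : ¬(pvGetS piece "type" ≠ "R" ∧ pvGetS piece "type" ≠ "C") := by tauto
    simp only [if_neg htne, hrow, pvColOcc_getD grid c hc, List.foldl_cons, List.foldl_nil]
    rw [pvDirE grid r c piece _ _ hG hr hc ht, pvDirW grid r c piece _ _ hG hr hc ht,
      pvDirS grid r c piece _ _ hG hr hc ht, pvDirN grid r c piece _ _ hG hr hc ht]
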